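-- pv_equiv track=rewrite | github.com/flerdacodeu/CodeU-2018-Group2 | epinar/assignment1/q1.py | isSentenceAnagram
-- ===== SOURCE A (Python) =====
-- def isSentenceAnagram(sent1, sent2):
-- 	sent1 = sent1.split(' ')
-- 	sent2 = sent2.split(' ')
--
-- 	for i,v in enumerate(sent1):
-- 		sent1[i] = sorted(list(v))
--
-- 	for i,v in enumerate(sent2):
-- 		sent2[i] = sorted(list(v))
--
-- 	return sorted(sent1) == sorted(sent2)
-- ===== SOURCE B (Python) =====
-- def isSentenceAnagram(sent1, sent2):
--     def sig_counts(sent):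
--         counts = {}
--         for word in sent.split(' '):
--             key = tuple(sorted(word))
--             counts[key] = counts.get(key, 0) + 1
--         return counts
--     return sig_counts(sent1) == sig_counts(sent2)
-- ===== Notes on version B (the rewrite author's own statement) =====
-- stated objective: idiomatic
-- what changed: B drops A's outer sort of the two signature lists: it tallies each word's sorted-letter signature into a per-sentence dict (a multiset of signatures) and compares the two frequency tables, instead of sorting both lists of signatures and comparing them element-wise.
import Mathlib
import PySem

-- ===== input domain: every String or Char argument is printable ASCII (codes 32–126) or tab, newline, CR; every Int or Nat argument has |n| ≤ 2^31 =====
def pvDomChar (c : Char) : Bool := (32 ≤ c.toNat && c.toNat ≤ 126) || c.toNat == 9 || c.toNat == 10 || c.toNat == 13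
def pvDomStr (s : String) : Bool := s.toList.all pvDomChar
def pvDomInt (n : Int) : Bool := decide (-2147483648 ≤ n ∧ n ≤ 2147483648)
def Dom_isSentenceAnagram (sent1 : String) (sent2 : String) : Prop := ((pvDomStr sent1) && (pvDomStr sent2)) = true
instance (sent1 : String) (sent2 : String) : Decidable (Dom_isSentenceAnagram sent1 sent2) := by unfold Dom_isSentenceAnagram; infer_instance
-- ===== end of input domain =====

-- B replaces A's sort-both-lists-of-signatures-and-compare by tallying the sorted-letter
-- signature of each word into a dict (a multiset) per sentence and comparing the two dicts
-- Python-style (same keys, same counts) — idiomatic; no change in side effects (neither mutates).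

-- ===== PORT A =====
-- sorted(list(v)) and sorted(sent) compare lists lexicographically; List.instLinearOrder on
-- List Char is that lexicographic order (by character code), exact for Python's list <.
def pvSortChars (w : List Char) : List Char :=
  PySem.List.sorted w (fun c => c) false

def pvSortSigs (xs : List (List Char)) : List (List Char) :=
  @PySem.List.sorted (List Char) (List Char) List.instLinearOrder.toLT LinearOrder.toDecidableLT xs (fun x => x) false

def isSentenceAnagram (sent1 : String) (sent2 : String) : Bool :=
  let s1 := (PySem.Chars.splitOn sent1.toList [' ']).map pvSortChars
  let s2 := (PySem.Chars.splitOn sent2.toList [' ']).map pvSortChars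
  decide (pvSortSigs s1 = pvSortSigs s2)

-- ===== PORT B =====
-- counts[key] = counts.get(key, 0) + 1 over the words of one sentence
def pvSigCounts (sent : String) : PySem.Dict (List Char) Int :=
  (PySem.Chars.splitOn sent.toList [' ']).foldl
    (fun d w =>
      let key := pvSortChars w
      d.insert key (d.getD key 0 + 1))
    PySem.Dict.empty

-- Python's dict ==: same size and every entry of d1 looked up in d2 with the same value
def pvDictEq (d1 d2 : PySem.Dict (List Char) Int) : Bool :=
  d1.size == d2.size && d1.items.all (fun p => d2.get? p.1 == some p.2)

def isSentenceAnagram_alt (sent1 : String) (sent2 : String) : Bool :=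
  pvDictEq (pvSigCounts sent1) (pvSigCounts sent2)

-- ===== PRECONDITION & SPEC =====
def Spec_isSentenceAnagram (sent1 : String) (sent2 : String) (out : Bool) : Prop := out = isSentenceAnagram_alt sent1 sent2
instance (sent1 : String) (sent2 : String) (out : Bool) : Decidable (Spec_isSentenceAnagram sent1 sent2 out) := by unfold Spec_isSentenceAnagram; infer_instance

-- ===== CLAIM (what is proved, stated in full; the proofs are below) =====
def Claim_equal_isSentenceAnagram : Prop := ∀ (sent1 : String) (sent2 : String), Dom_isSentenceAnagram sent1 sent2 → Spec_isSentenceAnagram sent1 sent2 (isSentenceAnagram sent1 sent2)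

-- ===== LEMMAS AND PROOFS =====

-- the multiset of word signatures of one sentence
def pvSigs (sent : String) : List (List Char) :=
  (PySem.Chars.splitOn sent.toList [' ']).map pvSortChars

lemma pvSigCounts_eq_counter (sent : String) :
    pvSigCounts sent = PySem.Dict.counter (pvSigs sent) := by
  unfold pvSigCounts pvSigs
  rw [← PySem.Dict.foldl_insert_getD_add_one_eq_counter, List.foldl_map]

lemma pvDictEq_counter_iff (xs ys : List (List Char)) :
    pvDictEq (PySem.Dict.counter xs) (PySem.Dict.counter ys) = true ↔ xs.Perm ys := by
  constructor
  · intro h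
    unfold pvDictEq at h
    simp only [Bool.and_eq_true, beq_iff_eq, List.all_eq_true] at h
    obtain ⟨hsize, hall⟩ := h
    -- every key of xs appears in ys with the same count
    have hkey : ∀ k ∈ xs, k ∈ ys ∧ ys.count k = xs.count k := by
      intro k hk
      have hmem : (k, (xs.count k : Int)) ∈ (PySem.Dict.counter xs).items := by
        rw [PySem.Dict.items_counter]
        exact List.mem_map.2 ⟨k, (PySem.Set.mem_ofList xs k).2 hk, rfl⟩
      have := hall _ hmem
      have hmem2 := PySem.Dict.mem_items_of_get?_eq_some _ this
      rw [PySem.Dict.items_counter] at hmem2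
      obtain ⟨k', hk', heq⟩ := List.mem_map.1 hmem2
      simp only [Prod.mk.injEq] at heq
      obtain ⟨h1, h2⟩ := heq
      subst h1
      exact ⟨(PySem.Set.mem_ofList ys _).1 hk', by exact_mod_cast h2⟩
    -- set sizes are equal, so key membership is symmetric
    have hsub : (PySem.Set.ofList xs : List (List Char)) ⊆ PySem.Set.ofList ys := by
      intro k hk
      exact (PySem.Set.mem_ofList ys k).2 (hkey k ((PySem.Set.mem_ofList xs k).1 hk)).1
    have hlen : (PySem.Set.ofList ys : List (List Char)).length = (PySem.Set.ofList xs : List (List Char)).length := by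
      have h1 := PySem.Dict.items_counter xs
      have h2 := PySem.Dict.items_counter ys
      have : (PySem.Dict.counter xs).size = (PySem.Dict.counter ys).size := hsize
      simp only [PySem.Dict.size, h1, h2, List.length_map] at this
      omega
    have hperm : (PySem.Set.ofList xs : List (List Char)).Perm (PySem.Set.ofList ys) :=
      (List.subperm_of_subset (PySem.Set.nodup_ofList xs) hsub).perm_of_length_le (le_of_eq hlen)
    refine List.perm_iff_count.2 (fun k => ?_)
    by_cases hk : k ∈ xs
    · exact (hkey k hk).2.symm
    · have hky : k ∉ ys := by
        intro hky
        exact hk ((PySem.Set.mem_ofList xs k).1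
          (hperm.mem_iff.2 ((PySem.Set.mem_ofList ys k).2 hky)))
      rw [List.count_eq_zero.2 hk, List.count_eq_zero.2 hky]
  · intro hp
    unfold pvDictEq
    simp only [Bool.and_eq_true, beq_iff_eq, List.all_eq_true]
    have hsetperm : (PySem.Set.ofList xs : List (List Char)).Perm (PySem.Set.ofList ys) := by
      have hsub : (PySem.Set.ofList xs : List (List Char)) ⊆ PySem.Set.ofList ys := fun k hk =>
        (PySem.Set.mem_ofList ys k).2 (hp.mem_iff.1 ((PySem.Set.mem_ofList xs k).1 hk))
      have hsub' : (PySem.Set.ofList ys : List (List Char)) ⊆ PySem.Set.ofList xs := fun k hk =>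
        (PySem.Set.mem_ofList xs k).2 (hp.mem_iff.2 ((PySem.Set.mem_ofList ys k).1 hk))
      exact (List.subperm_of_subset (PySem.Set.nodup_ofList xs) hsub).antisymm
        (List.subperm_of_subset (PySem.Set.nodup_ofList ys) hsub')
    constructor
    · simp only [PySem.Dict.size, PySem.Dict.items_counter, List.length_map]
      exact hsetperm.length_eq
    · intro p hmem
      rw [PySem.Dict.items_counter] at hmem
      obtain ⟨k, hk, heq⟩ := List.mem_map.1 hmem
      subst heq
      have hky : k ∈ ys := hp.mem_iff.1 ((PySem.Set.mem_ofList xs k).1 hk)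
      have : (k, (ys.count k : Int)) ∈ (PySem.Dict.counter ys).items := by
        rw [PySem.Dict.items_counter]
        exact List.mem_map.2 ⟨k, (PySem.Set.mem_ofList ys k).2 hky, rfl⟩
      have hget := PySem.Dict.get?_of_mem_items _ this (PySem.Dict.nodup_keys_counter ys)
      rw [hget, hp.count_eq]

-- ===== VERDICT (by name: the statement is the Claim_ definition above) =====
theorem isSentenceAnagram_spec : Claim_equal_isSentenceAnagram := by
  intro sent1 sent2 _
  unfold Spec_isSentenceAnagram
  show decide (pvSortSigs (pvSigs sent1) = pvSortSigs (pvSigs sent2)) = isSentenceAnagram_alt sent1 sent2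
  unfold isSentenceAnagram_alt pvSortSigs
  rw [pvSigCounts_eq_counter, pvSigCounts_eq_counter]
  by_cases hp : (pvSigs sent1).Perm (pvSigs sent2)
  · rw [(pvDictEq_counter_iff _ _).2 hp,
      decide_eq_true ((PySem.List.sorted_id_eq_sorted_id_iff_perm _ _).2 hp)]
  · rw [decide_eq_false
      (fun h => hp ((PySem.List.sorted_id_eq_sorted_id_iff_perm _ _).1 h))]
    cases hdq : pvDictEq (PySem.Dict.counter (pvSigs sent1)) (PySem.Dict.counter (pvSigs sent2))
    · rfl
    · exact absurd ((pvDictEq_counter_iff _ _).1 hdq) hp
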